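-- pv_equiv track=rewrite | github.com/MonicaRondon/CIT590 | Assignment 05 Squarelotron/Assignment5Rondon/squarelotron.py | main_diagonal_flip
-- ===== SOURCE A (Python) =====
-- def make_squarelotron(list):
--     """Given a "flat" list of 25 numbers, make and return a squarelotron"""
--     assert len(list) == 25
--     # take list of 25 numbers
--     # tell computer to take the first 5 numbers and put into 1 list
--     # tell computer to take the next 5 numbers and put into 1 list
--     # do this three more times
--     # return new list of lists
--     squarelotron = []
--     for i in range(0, 25, 5):
--         squarelotron.append(list[i: i + 5])
--     return squarelotron
--
-- def make_list(squarelotron):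
--     """Given a squarelotron, makes and returns a flat list of 25 numbers"""
--     list = []
--     #take squarelotron list, add the first row to the empty list
--     #add the second row to the empty list
--     #do this three more times
--     #return full flat list
--     for row in squarelotron:
--         list = list + row
--     return list
--
-- def swap(list, index, distance):
--     """swaps two spots on a FLAT list based on a starter index and distance
--     between the starter and end index"""
--     hold = list[index]
--     list[index] = list[index + distance] #flips location value
--     list[index + distance] = hold
--
-- def main_diagonal_flip(squarelotron, ring):
--     """Performs the Main Diagonal Flip of the squarelotron,
--     and returns the new squarelotron."""
--     new_squarelotron = make_list(squarelotron)
--     if ring == "inner":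
--         swap(new_squarelotron, 8, 8)
--         for i in range(7, 14, 6):
--             swap(new_squarelotron, i, 4)
--         return make_squarelotron(new_squarelotron)
--     if ring == "outer":
--         for i in range(1,5):
--             swap(new_squarelotron, i, (4*i))
--         for i in range(9, 20, 5):
--             multiplier =  int((i - 9) / 5)*4
--             swap(new_squarelotron, i, (12 - multiplier))
--     return make_squarelotron(new_squarelotron)
-- ===== SOURCE B (Python) =====
-- OUTER_PAIRS = [(0, 1), (0, 2), (0, 3), (0, 4), (1, 4), (2, 4), (3, 4)]
-- INNER_PAIRS = [(1, 2), (1, 3), (2, 3)]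
--
-- def main_diagonal_flip(squarelotron, ring):
--     """Performs the Main Diagonal Flip of the squarelotron,
--     and returns the new squarelotron."""
--     assert len(squarelotron) == 5 and all(len(row) == 5 for row in squarelotron)
--     new = [row[:] for row in squarelotron]
--     if ring == "outer":
--         pairs = OUTER_PAIRS
--     elif ring == "inner":
--         pairs = INNER_PAIRS
--     else:
--         pairs = []
--     for r, c in pairs:
--         new[r][c], new[c][r] = new[c][r], new[r][c]
--     return new
-- ===== Notes on version B (the rewrite author's own statement) =====
-- stated objective: simpler
-- what changed: B drops A's flatten / flat-index-swap-with-computed-distances / reshape pipeline and instead deep-copies the 5x5 grid and transposes the ring's off-diagonal coordinate pairs directly via new[r][c] <-> new[c][r].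
import Mathlib
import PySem

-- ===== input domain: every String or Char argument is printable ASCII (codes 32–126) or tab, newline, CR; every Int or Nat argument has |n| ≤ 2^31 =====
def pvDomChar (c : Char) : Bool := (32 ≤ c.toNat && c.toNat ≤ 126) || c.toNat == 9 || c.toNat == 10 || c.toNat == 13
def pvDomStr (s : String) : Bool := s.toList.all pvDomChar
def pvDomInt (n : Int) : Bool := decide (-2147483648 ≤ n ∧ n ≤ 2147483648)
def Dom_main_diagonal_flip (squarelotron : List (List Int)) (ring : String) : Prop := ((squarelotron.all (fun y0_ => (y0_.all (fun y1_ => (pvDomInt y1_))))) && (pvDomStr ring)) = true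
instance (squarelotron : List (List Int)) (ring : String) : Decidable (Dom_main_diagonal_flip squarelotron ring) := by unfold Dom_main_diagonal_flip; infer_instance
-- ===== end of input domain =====

-- B rebuilds the result as a 2D deep copy and transposes the ring's off-diagonal
-- coordinate pairs directly, instead of A's flatten / flat-index swaps / reshape
-- (objective: simpler).  Equivalence of RETURN values on 5×5 inputs.

-- ===== PORT A =====
def pvMakeList (squarelotron : List (List Int)) : List Int :=
  squarelotron.foldl (fun acc row => acc ++ row) []

def pvMakeSquarelotron (l : List Int) : List (List Int) :=
  (PySem.List.pyRange 0 25 5).foldl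
    (fun acc i => acc ++ [PySem.List.slice l (some i) (some (i + 5))]) []

-- swap(list, index, distance); Python mutates in place, modelled by returning the list
def pvSwap (l : List Int) (index distance : Int) : List Int :=
  match PySem.List.pyGet? l index, PySem.List.pyGet? l (index + distance) with
  | some hold, some b => (l.set index.toNat b).set (index + distance).toNat hold
  | _, _ => l

def main_diagonal_flip (squarelotron : List (List Int)) (ring : String) : List (List Int) :=
  let new := pvMakeList squarelotron
  if ring = "inner" then
    let new := pvSwap new 8 8
    let new := (PySem.List.pyRange 7 14 6).foldl (fun l i => pvSwap l i 4) new
    pvMakeSquarelotron new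
  else if ring = "outer" then
    let new := (PySem.List.pyRange 1 5 1).foldl (fun l i => pvSwap l i (4 * i)) new
    let new := (PySem.List.pyRange 9 20 5).foldl
      (fun l i => pvSwap l i (12 - PySem.Int.floordiv (i - 9) 5 * 4)) new
    pvMakeSquarelotron new
  else
    pvMakeSquarelotron new

-- ===== PORT B =====
def pvOuterPairs : List (Nat × Nat) := [(0, 1), (0, 2), (0, 3), (0, 4), (1, 4), (2, 4), (3, 4)]
def pvInnerPairs : List (Nat × Nat) := [(1, 2), (1, 3), (2, 3)]

def pvGet2 (m : List (List Int)) (r c : Nat) : Int := (m.getD r []).getD c 0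
def pvSet2 (m : List (List Int)) (r c : Nat) (v : Int) : List (List Int) :=
  m.set r ((m.getD r []).set c v)

-- new[r][c], new[c][r] = new[c][r], new[r][c]
def pvSwap2 (m : List (List Int)) (p : Nat × Nat) : List (List Int) :=
  let x := pvGet2 m p.2 p.1
  let y := pvGet2 m p.1 p.2
  pvSet2 (pvSet2 m p.1 p.2 x) p.2 p.1 y

def main_diagonal_flip_alt (squarelotron : List (List Int)) (ring : String) : List (List Int) :=
  let new := squarelotron.map (fun row => row)
  let pairs := if ring = "outer" then pvOuterPairs
               else if ring = "inner" then pvInnerPairs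
               else []
  pairs.foldl pvSwap2 new

-- ===== PRECONDITION & SPEC =====
-- Pre_ excludes non-5×5 inputs: A asserts the flattened length is 25 (raising
-- AssertionError otherwise) and silently reshapes any input whose flattened
-- length happens to be 25, while B asserts the 2D 5×5 shape and raises
-- AssertionError there.
def Pre_main_diagonal_flip (squarelotron : List (List Int)) (ring : String) : Prop :=
  squarelotron.length = 5 ∧ (squarelotron.all fun row => row.length == 5) = true
instance (squarelotron : List (List Int)) (ring : String) : Decidable (Pre_main_diagonal_flip squarelotron ring) := by unfold Pre_main_diagonal_flip; infer_instance

def pvWitness_main_diagonal_flip : List (List Int) × String :=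
  ([[1,2,3,4,5],[6,7,8,9,10],[11,12,13,14,15],[16,17,18,19,20],[21,22,23,24,25]], "outer")

def Spec_main_diagonal_flip (squarelotron : List (List Int)) (ring : String) (out : List (List Int)) : Prop := out = main_diagonal_flip_alt squarelotron ring
instance (squarelotron : List (List Int)) (ring : String) (out : List (List Int)) : Decidable (Spec_main_diagonal_flip squarelotron ring out) := by unfold Spec_main_diagonal_flip; infer_instance

-- ===== CLAIM (what is proved, stated in full; the proofs are below) =====
def Claim_equal_main_diagonal_flip : Prop := ∀ (squarelotron : List (List Int)) (ring : String), Dom_main_diagonal_flip squarelotron ring → Pre_main_diagonal_flip squarelotron ring → Spec_main_diagonal_flip squarelotron ring (main_diagonal_flip squarelotron ring)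

-- ===== LEMMAS AND PROOFS =====
theorem pv_len5 {α : Type} (l : List α) (h : l.length = 5) :
    ∃ a b c d e, l = [a, b, c, d, e] := by
  match l, h with
  | [a, b, c, d, e], _ => exact ⟨a, b, c, d, e, rfl⟩

theorem pv_range1 : PySem.List.pyRange 0 25 5 = [0, 5, 10, 15, 20] := by decide
theorem pv_range2 : PySem.List.pyRange 7 14 6 = [7, 13] := by decide
theorem pv_range3 : PySem.List.pyRange 1 5 1 = [1, 2, 3, 4] := by decide
theorem pv_range4 : PySem.List.pyRange 9 20 5 = [9, 14, 19] := by decide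

-- ===== VERDICT (by name: the statement is the Claim_ definition above) =====
theorem main_diagonal_flip_spec : Claim_equal_main_diagonal_flip := by
  intro sq ring _ hpre
  obtain ⟨hlen, hrows⟩ := hpre
  obtain ⟨r0, r1, r2, r3, r4, rfl⟩ := pv_len5 sq hlen
  simp [List.all_cons] at hrows
  obtain ⟨h0, h1, h2, h3, h4⟩ := hrows
  obtain ⟨a0, a1, a2, a3, a4, rfl⟩ := pv_len5 r0 h0
  obtain ⟨b0, b1, b2, b3, b4, rfl⟩ := pv_len5 r1 h1
  obtain ⟨c0, c1, c2, c3, c4, rfl⟩ := pv_len5 r2 h2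
  obtain ⟨d0, d1, d2, d3, d4, rfl⟩ := pv_len5 r3 h3
  obtain ⟨e0, e1, e2, e3, e4, rfl⟩ := pv_len5 r4 h4
  unfold Spec_main_diagonal_flip
  by_cases hi : ring = "inner"
  · subst hi
    simp [main_diagonal_flip, main_diagonal_flip_alt, pvMakeList, pvMakeSquarelotron, pvSwap,
      pvSwap2, pvGet2, pvSet2, pvInnerPairs, pv_range1, pv_range2,
      PySem.List.pyGet?, PySem.List.pyIdx?, PySem.List.slice, Int.toNat]
  · by_cases ho : ring = "outer"
    · subst ho
      simp [main_diagonal_flip, main_diagonal_flip_alt, pvMakeList, pvMakeSquarelotron, pvSwap,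
        pvSwap2, pvGet2, pvSet2, pvOuterPairs, pv_range1, pv_range3, pv_range4,
        PySem.List.pyGet?, PySem.List.pyIdx?, PySem.List.slice, Int.toNat, PySem.Int.floordiv]
    · simp [main_diagonal_flip, main_diagonal_flip_alt, pvMakeList, pvMakeSquarelotron,
        hi, ho, pv_range1, PySem.List.slice]
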